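-- pv_equiv track=rewrite | github.com/dunnowhattogive/Advent-Of-Code | 2025/Day6/puzzle12.py | find_column_groups
-- ===== SOURCE A (Python) =====
-- def find_column_groups(lines):
-- 	if not lines:
-- 		return [], []
-- 	width = max(len(ln) for ln in lines)
-- 	grid = [ln.ljust(width) for ln in lines]
-- 	col_has = [any(grid[r][c] != ' ' for r in range(len(grid))) for c in range(width)]
-- 	groups = []
-- 	in_group = False
-- 	start = 0
-- 	for c, has in enumerate(col_has):
-- 		if has and not in_group:
-- 			in_group = True
-- 			start = c
-- 		elif not has and in_group:
-- 			groups.append((start, c - 1))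
-- 			in_group = False
-- 	if in_group:
-- 		groups.append((start, width - 1))
-- 	return grid, groups
-- ===== SOURCE B (Python) =====
-- def find_column_groups(lines):
-- 	if not lines:
-- 		return [], []
-- 	width = max(len(ln) for ln in lines)
-- 	grid = [ln.ljust(width) for ln in lines]
-- 	cols = [c for c in range(width) if any(row[c] != ' ' for row in grid)]
-- 	groups = []
-- 	for c in cols:
-- 		if groups and groups[-1][1] == c - 1:
-- 			groups[-1] = (groups[-1][0], c)
-- 		else:
-- 			groups.append((c, c))
-- 	return grid, groups
-- ===== Notes on version B (the rewrite author's own statement) =====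
-- stated objective: simpler
-- what changed: Replaces A's boolean-list + in_group/start state machine with post-loop flush by collecting the nonblank column indices and merging consecutive indices into runs in one fold.
import Mathlib
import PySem

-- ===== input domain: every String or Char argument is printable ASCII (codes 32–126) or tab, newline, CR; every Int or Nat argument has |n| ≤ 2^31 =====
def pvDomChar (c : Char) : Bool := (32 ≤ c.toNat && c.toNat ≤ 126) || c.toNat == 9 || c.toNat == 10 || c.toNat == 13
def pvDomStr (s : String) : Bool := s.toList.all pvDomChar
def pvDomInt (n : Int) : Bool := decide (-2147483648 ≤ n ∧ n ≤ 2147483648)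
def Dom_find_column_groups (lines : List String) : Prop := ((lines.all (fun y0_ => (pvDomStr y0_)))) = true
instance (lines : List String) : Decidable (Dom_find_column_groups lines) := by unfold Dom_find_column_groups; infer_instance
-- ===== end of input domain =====

-- B replaces A's in_group/start state machine (plus post-loop flush) by collecting the
-- nonblank column indices and merging consecutive indices into runs; objective: simpler.

-- ===== PORT A =====

-- str.ljust(w): pad on the right with spaces (exact: Nat subtraction is 0 when already long enough)
def pvLjust (s : List Char) (w : Nat) : List Char := s ++ List.replicate (w - s.length) ' '

-- one iteration of A's for-loop body (state = (groups, in_group, start))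
def pvStepA (c : Nat) (st : List (Int × Int) × Bool × Int) (has : Bool) :
    List (Int × Int) × Bool × Int :=
  match st with
  | (gs, ing, s) =>
    if has && !ing then (gs, true, (c : Int))
    else if !has && ing then (gs ++ [(s, (c : Int) - 1)], false, s)
    else (gs, ing, s)

-- A's `for c, has in enumerate(col_has)` loop, index carried explicitly
def pvLoopA : List Bool → Nat → (List (Int × Int) × Bool × Int) → List (Int × Int) × Bool × Int
  | [], _, st => st
  | has :: rest, c, st => pvLoopA rest (c + 1) (pvStepA c st has)

def find_column_groups (lines : List String) : List String × (List (Int × Int)) :=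
  if lines = [] then ([], [])
  else
    -- max(len(ln) for ln in lines); lengths are ≥ 0 so folding max from 0 is exact
    let width := (lines.map (fun ln => ln.toList.length)).foldl Nat.max 0
    let grid := lines.map (fun ln => pvLjust ln.toList width)
    -- grid[r][c]: indices are always in range (r < len(grid), c < width = len(grid[r])), so getD is exact
    let col_has := (List.range width).map (fun c =>
      (List.range grid.length).any (fun r => ((grid.getD r []).getD c ' ') != ' '))
    let res := pvLoopA col_has 0 ([], false, 0)
    let groups := if res.2.1 then res.1 ++ [(res.2.2, (width : Int) - 1)] else res.1
    (grid.map String.ofList, groups)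

-- ===== PORT B =====

-- B's loop body: merge column index c into the last run (kept at the head; list reversed at the end)
def pvMerge (acc : List (Int × Int)) (c : Nat) : List (Int × Int) :=
  match acc with
  | (s, e) :: rest =>
      if e == (c : Int) - 1 then (s, (c : Int)) :: rest
      else ((c : Int), (c : Int)) :: (s, e) :: rest
  | [] => [((c : Int), (c : Int))]

def find_column_groups_alt (lines : List String) : List String × (List (Int × Int)) :=
  if lines = [] then ([], [])
  else
    let width := (lines.map (fun ln => ln.toList.length)).foldl Nat.max 0
    let grid := lines.map (fun ln => pvLjust ln.toList width)
    -- row[c]: c < width = len(row), always in range, so getD is exact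
    let cols := (List.range width).filter (fun c => grid.any (fun row => row.getD c ' ' != ' '))
    (grid.map String.ofList, (cols.foldl pvMerge []).reverse)

-- ===== PRECONDITION & SPEC =====
def Spec_find_column_groups (lines : List String) (out : List String × (List (Int × Int))) : Prop := out = find_column_groups_alt lines
instance (lines : List String) (out : List String × (List (Int × Int))) : Decidable (Spec_find_column_groups lines out) := by unfold Spec_find_column_groups; infer_instance

-- ===== CLAIM (what is proved, stated in full; the proofs are below) =====
def Claim_equal_find_column_groups : Prop := ∀ (lines : List String), Dom_find_column_groups lines → Spec_find_column_groups lines (find_column_groups lines)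

-- ===== LEMMAS AND PROOFS =====

-- indexing-by-range `any` equals direct `any` over the elements
theorem pv_any_index (xs : List (List Char)) (p : List Char → Bool) :
    ((List.range xs.length).any (fun r => p (xs.getD r []))) = xs.any p := by
  induction xs with
  | nil => simp
  | cons x xs ih =>
    simp only [List.length_cons, List.range_succ_eq_map, List.any_cons, List.any_map]
    simp only [List.getD] at *
    simpa [Function.comp] using congrArg (fun b => p x || b) ih

theorem pvLoopA_append (l m : List Bool) (c : Nat) (st : List (Int × Int) × Bool × Int) :
    pvLoopA (l ++ m) c st = pvLoopA m (c + l.length) (pvLoopA l c st) := by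
  induction l generalizing c st with
  | nil => simp [pvLoopA]
  | cons x l ih =>
    simp only [List.cons_append, pvLoopA, ih, List.length_cons]
    ring_nf

-- the joint loop invariant relating A's state machine to B's run-merging fold
theorem pv_inv (p : Nat → Bool) (w : Nat) :
    (((pvLoopA ((List.range w).map p) 0 ([], false, 0)).2.1 = true →
        ((List.range w).filter p).foldl pvMerge [] =
          ((pvLoopA ((List.range w).map p) 0 ([], false, 0)).2.2, (w : Int) - 1) ::
            (pvLoopA ((List.range w).map p) 0 ([], false, 0)).1.reverse)) ∧
    (((pvLoopA ((List.range w).map p) 0 ([], false, 0)).2.1 = false →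
        ((List.range w).filter p).foldl pvMerge [] =
          (pvLoopA ((List.range w).map p) 0 ([], false, 0)).1.reverse ∧
        ∀ a e rest, ((List.range w).filter p).foldl pvMerge [] = (a, e) :: rest →
          e + 1 < (w : Int))) := by
  induction w with
  | zero =>
    constructor
    · intro h; simp [pvLoopA] at h
    · intro _; refine ⟨by simp [pvLoopA], ?_⟩
      intro a e rest h; simp at h
  | succ w ih =>
    obtain ⟨ih₁, ih₂⟩ := ih
    have hrange : List.range (w + 1) = List.range w ++ [w] := List.range_succ
    set st := pvLoopA ((List.range w).map p) 0 ([], false, 0) with hst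
    obtain ⟨gs, ing, s⟩ := st
    have hloop : pvLoopA ((List.range (w + 1)).map p) 0 ([], false, 0)
        = pvStepA w (gs, ing, s) (p w) := by
      rw [hrange]; simp only [List.map_append, List.map_cons, List.map_nil]
      rw [pvLoopA_append]
      simp [← hst, pvLoopA]
    have hfilter : (List.range (w + 1)).filter p
        = (List.range w).filter p ++ (if p w = true then [w] else []) := by
      rw [hrange, List.filter_append]
      cases hpw : p w <;> simp [hpw]
    have hcast : ((w + 1 : Nat) : Int) - 1 = (w : Int) := by push_cast; ring
    rw [hloop, hfilter, List.foldl_append]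
    cases hp : p w with
    | false =>
      cases hing : ing with
      | false =>
        obtain ⟨h1, h2⟩ := ih₂ hing
        have hstep : pvStepA w (gs, false, s) false = (gs, false, s) := by
          simp [pvStepA]
        rw [hstep]
        simp only [Bool.false_eq_true, if_false, List.foldl_nil]
        refine ⟨fun h => absurd h (by simp), fun _ => ⟨by simpa using h1, ?_⟩⟩
        intro a e rest h
        have := h2 a e rest (by simpa using h)
        push_cast
        omega
      | true =>
        have h1 := ih₁ hing
        have hstep : pvStepA w (gs, true, s) false = (gs ++ [(s, (w : Int) - 1)], false, s) := by
          simp [pvStepA]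
        rw [hstep]
        simp only [Bool.false_eq_true, if_false, List.foldl_nil]
        refine ⟨fun h => absurd h (by simp), fun _ => ⟨by simp [h1], ?_⟩⟩
        intro a e rest h
        simp only [h1] at h
        have he : e = (w : Int) - 1 := by
          simp at h
          omega
        push_cast
        omega
    | true =>
      cases hing : ing with
      | true =>
        have h1 := ih₁ hing
        have hstep : pvStepA w (gs, true, s) true = (gs, true, s) := by
          simp [pvStepA]
        rw [hstep]
        rw [if_pos rfl]
        refine ⟨fun _ => ?_, fun h => absurd h (by simp)⟩
        show List.foldl pvMerge _ [w] = (s, ((w + 1 : Nat) : Int) - 1) :: gs.reverse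
        rw [h1]
        simp only [List.foldl_cons, List.foldl_nil, pvMerge]
        rw [if_pos (by simp), hcast]
      | false =>
        obtain ⟨h1, h2⟩ := ih₂ hing
        have hstep : pvStepA w (gs, false, s) true = (gs, true, (w : Int)) := by
          simp [pvStepA]
        rw [hstep]
        rw [if_pos rfl]
        refine ⟨fun _ => ?_, fun h => absurd h (by simp)⟩
        show List.foldl pvMerge _ [w] = ((w : Int), ((w + 1 : Nat) : Int) - 1) :: gs.reverse
        rw [hcast]
        have h1' : List.foldl pvMerge [] (List.filter p (List.range w)) = gs.reverse := h1
        rw [h1']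
        cases hacc : gs.reverse with
        | nil => simp [pvMerge]
        | cons hd tl =>
          obtain ⟨a, e⟩ := hd
          have he := h2 a e tl (by rw [h1', hacc])
          simp only [List.foldl_cons, List.foldl_nil, pvMerge]
          rw [if_neg (by simp; omega)]

-- ===== VERDICT (by name: the statement is the Claim_ definition above) =====
theorem find_column_groups_spec : Claim_equal_find_column_groups := by
  intro lines _
  show find_column_groups lines = find_column_groups_alt lines
  by_cases hnil : lines = []
  · simp [find_column_groups, find_column_groups_alt, hnil]
  · simp only [find_column_groups, find_column_groups_alt, if_neg hnil]
    set width := (lines.map (fun ln => ln.toList.length)).foldl Nat.max 0 with hw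
    set grid := lines.map (fun ln => pvLjust ln.toList width) with hg
    have hpred : (fun c => (List.range grid.length).any (fun r => ((grid.getD r []).getD c ' ') != ' '))
        = (fun c => grid.any (fun row => row.getD c ' ' != ' ')) := by
      funext c; exact pv_any_index grid (fun row => row.getD c ' ' != ' ')
    rw [hpred]
    set p := fun c => grid.any (fun row => row.getD c ' ' != ' ') with hp
    have h := pv_inv p width
    set st := pvLoopA ((List.range width).map p) 0 ([], false, 0) with hst
    refine Prod.ext rfl ?_
    show (if st.2.1 then st.1 ++ [(st.2.2, (width : Int) - 1)] else st.1)
        = (((List.range width).filter p).foldl pvMerge []).reverse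
    cases hing : st.2.1 with
    | true =>
      rw [if_pos rfl, h.1 hing]
      simp
    | false =>
      rw [if_neg (by simp), (h.2 hing).1]
      simp
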